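-- pv_equiv track=rewrite | github.com/marco-link/extraction | scripts/merge.py | splitFileList
-- ===== SOURCE A (Python) =====
-- def splitFileList(allfiles, opath, feventlist, eventsperfile=100000):
--
--     ecounter = 0
--     out = []
--     temp = []
--     tempentries = []
--
--     for i, fpath in enumerate(allfiles):
--         nentries, preskim = feventlist[i]
--         tempentries.append((nentries, preskim))
--         ecounter += nentries
--         temp.append(fpath)
--         if ecounter >= eventsperfile or i == len(allfiles) - 1:
--             # dump
--             out.append((opath + '/merged_' + str(len(out)) + '.root',
--                         temp, tempentries))
--             ecounter = 0
--             temp = []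
--             tempentries = []
--
--     # sanity check
--     procfiles = []
--     for e in out:
--         procfiles.extend(e[1])
--     assert procfiles == allfiles
--
--     return out
-- ===== SOURCE B (Python) =====
-- def splitFileList(allfiles, opath, feventlist, eventsperfile=100000):
--     # zip each file with its event record once, up front
--     pairs = [(f, feventlist[i]) for i, f in enumerate(allfiles)]
--
--     # chop the pair list into chunks by computed cut length, slicing (no
--     # per-element accumulators): scan for the first position where the running
--     # event total reaches eventsperfile (or the list ends), slice there, repeat
--     chunks = []
--     ps = pairs
--     while ps:
--         total, k = 0, 0
--         while True:
--             total += ps[k][1][0]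
--             k += 1
--             if total >= eventsperfile or k == len(ps):
--                 break
--         chunks.append(ps[:k])
--         ps = ps[k:]
--
--     # name each chunk by its position and unzip it
--     return [(opath + '/merged_' + str(idx) + '.root',
--              [f for f, _ in ch], [e for _, e in ch])
--             for idx, ch in enumerate(chunks)]
-- ===== Notes on version B (the rewrite author's own statement) =====
-- stated objective: alternative
-- what changed: B first zips files with their event records, then repeatedly computes a cut length and slices the pair list into whole chunks (take/drop by index scan), finally naming and unzipping each chunk by its enumerate position; A instead runs one loop appending element-by-element to temp/tempentries accumulators, naming inline via len(out) and re-checking with an assert.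
import Mathlib
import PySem

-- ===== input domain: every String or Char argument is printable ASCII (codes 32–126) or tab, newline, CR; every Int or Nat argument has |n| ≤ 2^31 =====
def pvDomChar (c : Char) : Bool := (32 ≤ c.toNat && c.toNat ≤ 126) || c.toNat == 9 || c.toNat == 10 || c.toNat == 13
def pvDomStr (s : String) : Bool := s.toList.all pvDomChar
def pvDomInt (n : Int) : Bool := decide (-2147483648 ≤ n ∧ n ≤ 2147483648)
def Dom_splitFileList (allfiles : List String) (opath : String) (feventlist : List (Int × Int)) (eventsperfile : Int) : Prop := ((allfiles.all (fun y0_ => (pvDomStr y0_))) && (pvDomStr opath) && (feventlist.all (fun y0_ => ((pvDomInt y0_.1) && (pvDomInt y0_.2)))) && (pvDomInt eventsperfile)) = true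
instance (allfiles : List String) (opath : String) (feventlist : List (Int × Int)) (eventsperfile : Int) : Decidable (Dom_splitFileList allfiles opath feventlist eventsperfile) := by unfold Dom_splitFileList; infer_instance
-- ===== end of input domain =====

-- B zips files with their event records up front, then repeatedly computes a cut length and
-- slices the zipped list into whole chunks (take/drop), naming and unzipping each chunk by its
-- position; A runs one loop appending element-by-element to accumulators, naming inline via
-- len(out) with a trailing assert. Objective: alternative. Equal return value on Pre_ (proved).

-- ===== PORT A =====
-- loop over enumerate(allfiles); state: ecounter, out, temp, tempentries.
-- feventlist[i] is PySem.List.pyGet?; 'none' = IndexError (the input is then outside Pre_).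
def splitA_go (opath : String) (feventlist : List (Int × Int)) (eventsperfile : Int) (n : Nat) :
    List (Int × String) → Int → List (String × List String × (List (Int × Int))) → List String → List (Int × Int) → List (String × List String × (List (Int × Int)))
  | [], _, out, _, _ => out
  | (i, fpath) :: rest, ecounter, out, temp, tempentries =>
    match PySem.List.pyGet? feventlist i with
    | none => out  -- IndexError in Python; excluded by Pre_
    | some (nentries, preskim) =>
      let tempentries' := tempentries ++ [(nentries, preskim)]
      let ecounter' := ecounter + nentries
      let temp' := temp ++ [fpath]
      if ecounter' ≥ eventsperfile ∨ i = (n : Int) - 1 then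
        splitA_go opath feventlist eventsperfile n rest 0
          (out ++ [(opath ++ "/merged_" ++ PySem.Int.toStr (out.length : Int) ++ ".root", temp', tempentries')]) [] []
      else
        splitA_go opath feventlist eventsperfile n rest ecounter' out temp' tempentries'

def splitFileList (allfiles : List String) (opath : String) (feventlist : List (Int × Int)) (eventsperfile : Int) : List (String × List String × (List (Int × Int))) :=
  let out := splitA_go opath feventlist eventsperfile allfiles.length (PySem.List.enumerate allfiles 0) 0 [] [] []
  -- sanity check: procfiles := concat of the file lists; the assert 'procfiles == allfiles'
  -- always succeeds when the loop completed without IndexError, so it has no effect on the value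
  let _procfiles := out.foldl (fun acc e => acc ++ e.2.1) ([] : List String)
  out

-- ===== PORT B =====
-- pairs = [(f, feventlist[i]) for i, f in enumerate(allfiles)]; the .getD is the
-- IndexError path of the comprehension (Python raises there; excluded by Pre_).
def pairsB (allfiles : List String) (feventlist : List (Int × Int)) : List (String × (Int × Int)) :=
  (PySem.List.enumerate allfiles 0).map (fun p => (p.2, (PySem.List.pyGet? feventlist p.1).getD (0, 0)))

-- inner 'while True' index scan: first k with running total ≥ eventsperfile or k = len(ps)
def takeLenB (eventsperfile : Int) : List (String × (Int × Int)) → Int → Nat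
  | [], _ => 0  -- never entered: the outer loop only scans a nonempty ps
  | p :: rest, total =>
    if total + p.2.1 ≥ eventsperfile ∨ rest = [] then 1 else 1 + takeLenB eventsperfile rest (total + p.2.1)

theorem takeLenB_pos (ev t : Int) (p : String × (Int × Int)) (rest : List (String × (Int × Int))) :
    1 ≤ takeLenB ev (p :: rest) t := by
  simp only [takeLenB]; split <;> omega

-- outer 'while ps': slice off ps[:k], continue on ps[k:]
def chunksB (eventsperfile : Int) (ps : List (String × (Int × Int))) : List (List (String × (Int × Int))) :=
  if _h : ps = [] then [] else
    let k := takeLenB eventsperfile ps 0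
    ps.take k :: chunksB eventsperfile (ps.drop k)
termination_by ps.length
decreasing_by
  cases ps with
  | nil => exact absurd rfl _h
  | cons p rest => simp only [List.length_drop]; have := takeLenB_pos eventsperfile 0 p rest; simp at *; omega

def splitFileList_alt (allfiles : List String) (opath : String) (feventlist : List (Int × Int)) (eventsperfile : Int) : List (String × List String × (List (Int × Int))) :=
  let pairs := pairsB allfiles feventlist
  (PySem.List.enumerate (chunksB eventsperfile pairs) 0).map
    (fun p => (opath ++ "/merged_" ++ PySem.Int.toStr p.1 ++ ".root", p.2.map Prod.fst, p.2.map Prod.snd))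

-- ===== PRECONDITION & SPEC =====
-- Pre_ excludes exactly the inputs where Python A raises IndexError: feventlist shorter than allfiles.
def Pre_splitFileList (allfiles : List String) (opath : String) (feventlist : List (Int × Int)) (eventsperfile : Int) : Prop :=
  allfiles.length ≤ feventlist.length
instance (allfiles : List String) (opath : String) (feventlist : List (Int × Int)) (eventsperfile : Int) : Decidable (Pre_splitFileList allfiles opath feventlist eventsperfile) := by unfold Pre_splitFileList; infer_instance
def pvWitness_splitFileList : List String × String × (List (Int × Int)) × Int := (["a.root", "b.root", "c.root"], "out", [(3, 1), (4, 0), (2, 1)], 5)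

def Spec_splitFileList (allfiles : List String) (opath : String) (feventlist : List (Int × Int)) (eventsperfile : Int) (out : List (String × List String × (List (Int × Int)))) : Prop := out = splitFileList_alt allfiles opath feventlist eventsperfile
instance (allfiles : List String) (opath : String) (feventlist : List (Int × Int)) (eventsperfile : Int) (out : List (String × List String × (List (Int × Int)))) : Decidable (Spec_splitFileList allfiles opath feventlist eventsperfile out) := by unfold Spec_splitFileList; infer_instance

-- ===== CLAIM (what is proved, stated in full; the proofs are below) =====
def Claim_equal_splitFileList : Prop := ∀ (allfiles : List String) (opath : String) (feventlist : List (Int × Int)) (eventsperfile : Int), Dom_splitFileList allfiles opath feventlist eventsperfile → Pre_splitFileList allfiles opath feventlist eventsperfile → Spec_splitFileList allfiles opath feventlist eventsperfile (splitFileList allfiles opath feventlist eventsperfile)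

-- ===== LEMMAS AND PROOFS =====

-- naming + unzipping chunks from index k (what B's enumerate-map does, index-shifted)
def nameFromU (opath : String) (k : Int) : List (List (String × (Int × Int))) → List (String × List String × (List (Int × Int)))
  | [] => []
  | ch :: chs => (opath ++ "/merged_" ++ PySem.Int.toStr k ++ ".root", ch.map Prod.fst, ch.map Prod.snd) :: nameFromU opath (k + 1) chs

theorem enumerate_map_eq_nameFromU (opath : String) (gs : List (List (String × (Int × Int)))) (k : Int) :
    (PySem.List.enumerate gs k).map
      (fun p => (opath ++ "/merged_" ++ PySem.Int.toStr p.1 ++ ".root", p.2.map Prod.fst, p.2.map Prod.snd))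
      = nameFromU opath k gs := by
  induction gs generalizing k with
  | nil => simp [PySem.List.enumerate_nil, nameFromU]
  | cons g gs ih => simp [PySem.List.enumerate_cons, nameFromU, ih]

-- one-element-at-a-time chunking (mediates between A's loop and B's take/drop)
def stepChunks (eventsperfile : Int) : List (String × (Int × Int)) → List (String × (Int × Int)) → Int → List (List (String × (Int × Int)))
  | [], _, _ => []
  | p :: rest, acc, ec =>
    if ec + p.2.1 ≥ eventsperfile ∨ rest = [] then (acc ++ [p]) :: stepChunks eventsperfile rest [] 0
    else stepChunks eventsperfile rest (acc ++ [p]) (ec + p.2.1)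

theorem chunksB_eq (ev : Int) (ps : List (String × (Int × Int))) :
    chunksB ev ps = if ps = [] then [] else ps.take (takeLenB ev ps 0) :: chunksB ev (ps.drop (takeLenB ev ps 0)) := by
  rw [chunksB]
  by_cases h : ps = [] <;> simp [h]

theorem stepChunks_eq_chunksB_aux (ev : Int) (ps acc : List (String × (Int × Int))) (ec : Int) :
    stepChunks ev ps acc ec
      = if ps = [] then [] else (acc ++ ps.take (takeLenB ev ps ec)) :: chunksB ev (ps.drop (takeLenB ev ps ec)) := by
  induction ps generalizing acc ec with
  | nil => simp [stepChunks]
  | cons p rest ih =>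
    by_cases h : ec + p.2.1 ≥ ev ∨ rest = []
    · simp only [stepChunks, if_pos h, takeLenB]
      rw [ih [] 0]
      simp only [List.nil_append]
      rw [← chunksB_eq]
      simp
    · have hr : rest ≠ [] := fun hr => h (Or.inr hr)
      have hk : takeLenB ev (p :: rest) ec = takeLenB ev rest (ec + p.2.1) + 1 := by
        simp only [takeLenB, if_neg h]; omega
      simp only [stepChunks, if_neg h]
      rw [ih, hk]
      simp [hr, List.take_succ_cons, List.drop_succ_cons]

theorem stepChunks_eq_chunksB (ev : Int) (ps : List (String × (Int × Int))) :
    stepChunks ev ps [] 0 = chunksB ev ps := by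
  rw [stepChunks_eq_chunksB_aux]
  simp only [List.nil_append]
  rw [← chunksB_eq]

-- pairsB is zip once feventlist is long enough
theorem pairsB_aux (fl : List (Int × Int)) (sfx : List String) (c : Nat)
    (h : c + sfx.length ≤ fl.length) :
    (PySem.List.enumerate sfx (c : Int)).map (fun p => (p.2, (PySem.List.pyGet? fl p.1).getD (0, 0)))
      = sfx.zip (fl.drop c) := by
  induction sfx generalizing c with
  | nil => simp [PySem.List.enumerate_nil]
  | cons f sfx ih =>
    have hc : c < fl.length := by simp at h; omega
    rw [List.drop_eq_getElem_cons hc]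
    have : ((c : Int) + 1) = ((c + 1 : Nat) : Int) := by push_cast; ring
    simp only [PySem.List.enumerate_cons, List.map_cons, this, List.zip_cons_cons]
    rw [ih (c + 1) (by simp at h ⊢; omega)]
    simp [hc]

theorem pairsB_eq_zip (allfiles : List String) (fl : List (Int × Int))
    (h : allfiles.length ≤ fl.length) : pairsB allfiles fl = allfiles.zip fl := by
  have := pairsB_aux fl allfiles 0 (by omega)
  simpa [pairsB] using this

-- main invariant: A's loop equals naming the step-chunks of the remaining zipped suffix
theorem splitA_eq_stepChunks (opath : String) (fl : List (Int × Int)) (ev : Int) (n : Nat)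
    (sfx : List String) (c : Nat) (ec : Int) (out : List (String × List String × (List (Int × Int))))
    (temp : List String) (te : List (Int × Int))
    (hc : c + sfx.length = n) (hn : n ≤ fl.length) (hlen : temp.length = te.length) :
    splitA_go opath fl ev n (PySem.List.enumerate sfx (c : Int)) ec out temp te
      = out ++ nameFromU opath (out.length : Int) (stepChunks ev (sfx.zip (fl.drop c)) (temp.zip te) ec) := by
  induction sfx generalizing c ec out temp te with
  | nil => simp [PySem.List.enumerate_nil, splitA_go, stepChunks, nameFromU]
  | cons fpath sfx ih =>
    have hcn : c < fl.length := by simp at hc; omega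
    have hget : PySem.List.pyGet? fl (c : Int) = some fl[c] := by
      simp [hcn]
    have hdrop : fl.drop c = fl[c] :: fl.drop (c + 1) := List.drop_eq_getElem_cons hcn
    have hzlen : sfx.length ≤ (fl.drop (c + 1)).length := by
      simp only [List.length_drop]; simp at hc; omega
    have hrest : (sfx.zip (fl.drop (c + 1)) = []) ↔ sfx = [] := by
      constructor
      · intro hz
        cases sfx with
        | nil => rfl
        | cons a as =>
          cases hfl : fl.drop (c + 1) with
          | nil => simp [hfl] at hzlen
          | cons b bs => simp [hfl] at hz
      · intro hs; simp [hs]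
    have hlast : ((c : Int) = (n : Int) - 1) ↔ sfx = [] := by
      constructor
      · intro h1
        cases sfx with
        | nil => rfl
        | cons x xs => exfalso; simp at hc; omega
      · intro h1; subst h1; simp at hc; omega
    have hiff : (ec + (fl[c]).1 ≥ ev ∨ (c : Int) = (n : Int) - 1)
        ↔ (ec + (fl[c]).1 ≥ ev ∨ sfx.zip (fl.drop (c + 1)) = []) :=
      or_congr Iff.rfl (hlast.trans hrest.symm)
    have hcast : ((c : Int) + 1) = ((c + 1 : Nat) : Int) := by push_cast; ring
    rw [hdrop]
    simp only [PySem.List.enumerate_cons, splitA_go, hget, List.zip_cons_cons, stepChunks,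
      List.get_eq_getElem, Prod.mk.eta, hcast]
    by_cases h1 : ec + (fl[c]).1 ≥ ev ∨ (c : Int) = (n : Int) - 1
    · rw [if_pos h1, if_pos (hiff.mp h1)]
      rw [ih (c + 1) 0 _ [] [] (by simp at hc ⊢; omega) rfl]
      have hfst : ((temp.zip te) ++ [(fpath, fl[c])]).map Prod.fst = temp ++ [fpath] := by
        simp [List.map_fst_zip (le_of_eq hlen)]
      have hsnd : ((temp.zip te) ++ [(fpath, fl[c])]).map Prod.snd = te ++ [fl[c]] := by
        simp [List.map_snd_zip (le_of_eq hlen.symm)]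
      simp only [nameFromU, hfst, hsnd, List.zip_nil_left]
      simp [List.append_assoc]
    · rw [if_neg h1, if_neg fun hq => h1 (hiff.mpr hq)]
      rw [ih (c + 1) _ _ (temp ++ [fpath]) (te ++ [fl[c]]) (by simp at hc ⊢; omega) (by simp [hlen])]
      rw [List.zip_append hlen]
      simp

-- ===== VERDICT (by name: the statement is the Claim_ definition above) =====
theorem splitFileList_spec : Claim_equal_splitFileList := by
  intro allfiles opath feventlist eventsperfile _ hpre
  unfold Spec_splitFileList splitFileList_alt
  rw [enumerate_map_eq_nameFromU, pairsB_eq_zip _ _ hpre, ← stepChunks_eq_chunksB]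
  have hA : splitFileList allfiles opath feventlist eventsperfile
      = splitA_go opath feventlist eventsperfile allfiles.length
          (PySem.List.enumerate allfiles ((0 : Nat) : Int)) 0 [] [] [] := rfl
  rw [hA, splitA_eq_stepChunks opath feventlist eventsperfile allfiles.length allfiles 0 0 [] [] []
    (by simp) hpre rfl]
  simp
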